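-- pv_equiv track=rewrite | github.com/mua-uniandes/weekly-problems | codeforces/1511/C/1511C.py | solve
-- ===== SOURCE A (Python) =====
-- def solve(a, t):
--     bst_pos = {}
--
--     for idx, i in enumerate(a):
--         if i not in bst_pos:
--             bst_pos[i] = idx + 1
--
--     pos = []
--     for q in t:
--         jpos = bst_pos[q]
--         pos.append(str(jpos))
--         for i,j in bst_pos.items():
--             if j < jpos:
--                 bst_pos[i] += 1
--
--         bst_pos[q] = 1
--
--     return " ".join(pos)
-- ===== SOURCE B (Python) =====
-- def solve(a, t):
--     deck = list(a)
--     out = []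
--     for q in t:
--         i = deck.index(q)
--         out.append(str(i + 1))
--         del deck[i]
--         deck.insert(0, q)
--     return " ".join(out)
-- ===== Notes on version B (the rewrite author's own statement) =====
-- stated objective: alternative
-- what changed: A maintains a dict mapping each color to its current first-occurrence position and rescans all dict entries per query to shift positions; B simulates the deck itself as a list (index, delete, re-insert at front), trading A's per-query pass over distinct colors for a pass over the full deck.
-- outside the precondition, e.g. on solve([1, 2], [3]): A raises KeyError, B raises ValueError
import Mathlib
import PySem

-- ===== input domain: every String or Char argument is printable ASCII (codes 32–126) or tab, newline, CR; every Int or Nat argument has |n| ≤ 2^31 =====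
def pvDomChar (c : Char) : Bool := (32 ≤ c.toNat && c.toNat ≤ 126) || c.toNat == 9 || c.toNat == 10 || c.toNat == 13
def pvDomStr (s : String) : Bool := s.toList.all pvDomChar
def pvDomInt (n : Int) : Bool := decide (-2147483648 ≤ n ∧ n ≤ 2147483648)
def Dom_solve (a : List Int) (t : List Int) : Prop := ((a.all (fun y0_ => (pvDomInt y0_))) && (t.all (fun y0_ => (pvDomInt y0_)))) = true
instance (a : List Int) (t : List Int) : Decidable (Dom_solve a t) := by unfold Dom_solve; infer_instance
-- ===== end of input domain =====

-- B replaces A's per-query rescan of a color→position dict by a direct list simulation of the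
-- move-to-front deck; return values proved equal on Pre_solve.

-- ===== PORT A =====
def solve (a : List Int) (t : List Int) : String :=
  -- for idx, i in enumerate(a): if i not in bst_pos: bst_pos[i] = idx + 1
  let bst0 : PySem.Dict Int Int :=
    (PySem.List.enumerate a 0).foldl
      (fun d p => if d.contains p.2 then d else d.insert p.2 (p.1 + 1))
      PySem.Dict.empty
  -- for q in t: jpos = bst_pos[q]; pos.append(str(jpos));
  --   for i,j in bst_pos.items(): if j < jpos: bst_pos[i] += 1   (a value pass over items())
  --   bst_pos[q] = 1
  let st : List String × PySem.Dict Int Int :=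
    t.foldl
      (fun st q =>
        let jpos := st.2.getD q 0   -- bst_pos[q]; KeyError (q not a key) excluded by Pre_solve
        let d' : PySem.Dict Int Int :=
          PySem.Dict.mk (st.2.items.map (fun p => if p.2 < jpos then (p.1, p.2 + 1) else p))
        (st.1 ++ [PySem.Int.toStr jpos], d'.insert q 1))
      ([], bst0)
  PySem.Str.join " " st.1

-- ===== PORT B =====
def solve_alt (a : List Int) (t : List Int) : String :=
  -- deck = list(a); for q in t: i = deck.index(q); out.append(str(i+1)); del deck[i]; deck.insert(0, q)
  let st : List String × List Int :=
    t.foldl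
      (fun st q =>
        match PySem.List.index? st.2 q with
        | some i => (st.1 ++ [PySem.Int.toStr ((i : Int) + 1)], q :: st.2.eraseIdx i)
        | none => st)   -- deck.index(q) raises ValueError: excluded by Pre_solve
      ([], a)
  PySem.Str.join " " st.1

-- ===== PRECONDITION & SPEC =====
-- Pre_ excludes queries for colors absent from the deck: there A raises KeyError (and B ValueError).
def Pre_solve (a : List Int) (t : List Int) : Prop := ∀ q ∈ t, q ∈ a
instance (a : List Int) (t : List Int) : Decidable (Pre_solve a t) := by unfold Pre_solve; infer_instance
def pvWitness_solve : List Int × List Int := ([3, 1, 2, 3], [2, 3, 1])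

def Spec_solve (a : List Int) (t : List Int) (out : String) : Prop := out = solve_alt a t
instance (a : List Int) (t : List Int) (out : String) : Decidable (Spec_solve a t out) := by unfold Spec_solve; infer_instance

-- ===== CLAIM (what is proved, stated in full; the proofs are below) =====
def Claim_equal_solve : Prop := ∀ (a : List Int) (t : List Int), Dom_solve a t → Pre_solve a t → Spec_solve a t (solve a t)

-- ===== LEMMAS AND PROOFS =====

-- A's dict with key list K, read against the current deck l: each key maps to its deck position + 1
def posItems (K l : List Int) : List (Int × Int) := K.map (fun x => (x, (l.idxOf x : Int) + 1))

theorem index?_eq_some_idxOf (l : List Int) (q : Int) (h : q ∈ l) :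
    PySem.List.index? l q = some (l.idxOf q) := by
  rw [PySem.List.index?_eq_idxOf?]
  induction l with
  | nil => simp at h
  | cons x xs ih =>
    by_cases hx : x = q
    · subst hx; simp [List.idxOf?_cons]
    · have hq : q ∈ xs := by
        rcases List.mem_cons.mp h with h1 | h1
        · exact absurd h1.symm hx
        · exact h1
      simp [List.idxOf?_cons, hx, ih hq]

-- position shift under move-to-front: the new deck is q :: l.erase q
theorem idxOf_moveToFront (l : List Int) (q x : Int) (hq : q ∈ l) (hx : x ∈ l) :
    ((q :: l.erase q).idxOf x : Int) =
      if x = q then 0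
      else if l.idxOf x < l.idxOf q then (l.idxOf x : Int) + 1 else (l.idxOf x : Int) := by
  by_cases hxq : x = q
  · simp [hxq, List.idxOf_cons_self]
  · obtain ⟨pre, suf, hdec, _, hqpre⟩ :=
      (PySem.List.index?_eq_some_iff l q (l.idxOf q)).mp (index?_eq_some_idxOf l q hq)
    subst hdec
    have herase : (pre ++ q :: suf).erase q = pre ++ suf := by
      rw [List.erase_append_right _ hqpre]; simp
    have hidxq : (pre ++ q :: suf).idxOf q = pre.length := by
      rw [List.idxOf_append_of_notMem hqpre]; simp [List.idxOf_cons_self]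
    rw [herase]
    by_cases hp : x ∈ pre
    · have h1 : (pre ++ q :: suf).idxOf x = pre.idxOf x := List.idxOf_append_of_mem hp
      have h2 : (pre ++ suf).idxOf x = pre.idxOf x := List.idxOf_append_of_mem hp
      have h3 : pre.idxOf x < pre.length := List.idxOf_lt_length_of_mem hp
      simp [hxq, Ne.symm hxq, h1, h2, hidxq, h3]
    · have hs : x ∈ suf := by
        rcases List.mem_append.mp hx with h1 | h1
        · exact absurd h1 hp
        · rcases List.mem_cons.mp h1 with h2 | h2
          · exact absurd h2 hxq
          · exact h2
      have h1 : (pre ++ q :: suf).idxOf x = pre.length + (q :: suf).idxOf x :=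
        List.idxOf_append_of_notMem hp
      have h2 : (pre ++ suf).idxOf x = pre.length + suf.idxOf x := List.idxOf_append_of_notMem hp
      have h4 : (q :: suf).idxOf x = suf.idxOf x + 1 := by simp [Ne.symm hxq]
      simp [hxq, Ne.symm hxq, h1, h2, hidxq, h4]
      ring

theorem keys_posItems (K l : List Int) : (PySem.Dict.mk (posItems K l)).keys = K := by
  simp only [posItems, PySem.Dict.keys, List.map_map]
  exact (List.map_congr_left fun x _ => rfl).trans (List.map_id _)

theorem getD_posItems (K l : List Int) (hK : K.Nodup) (x : Int) (hx : x ∈ K) :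
    (PySem.Dict.mk (posItems K l)).getD x 0 = (l.idxOf x : Int) + 1 := by
  apply PySem.Dict.getD_of_mem_items
  · exact List.mem_map_of_mem hx
  · rw [keys_posItems]; exact hK

-- one A-step on the dict is exactly the B-step on the deck, re-read through posItems
theorem dict_step (K l : List Int) (hK : K.Nodup) (hlK : ∀ x, x ∈ l ↔ x ∈ K) (q : Int) (hq : q ∈ l) :
    ((PySem.Dict.mk ((posItems K l).map
        (fun p => if p.2 < (PySem.Dict.mk (posItems K l)).getD q 0 then (p.1, p.2 + 1) else p))).insert q 1)
      = PySem.Dict.mk (posItems K (q :: l.erase q)) := by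
  rw [getD_posItems K l hK q ((hlK q).mp hq)]
  have hcont : (PySem.Dict.mk ((posItems K l).map
      (fun p => if p.2 < (l.idxOf q : Int) + 1 then (p.1, p.2 + 1) else p))).contains q = true := by
    rw [PySem.Dict.contains_iff_mem_keys]
    show q ∈ _
    simp only [PySem.Dict.keys, posItems, List.map_map]
    rw [(List.map_congr_left (l := K) (g := id) ?_).trans (List.map_id _)]
    · exact (hlK q).mp hq
    · intro x _; simp only [Function.comp_apply, id]; split <;> rfl
  apply PySem.Dict.ext
  rw [PySem.Dict.items_insert, hcont]
  simp only [if_true]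
  show ((posItems K l).map _).map _ = posItems K (q :: l.erase q)
  simp only [posItems, List.map_map]
  apply List.map_congr_left
  intro x hxK
  have hxl : x ∈ l := (hlK x).mpr hxK
  simp only [Function.comp_apply]
  rw [show ((q :: l.erase q).idxOf x : Int) = _ from idxOf_moveToFront l q x hq hxl]
  by_cases hxq : x = q
  · subst hxq
    simp
  · by_cases hlt : l.idxOf x < l.idxOf q
    · have h1 : ((l.idxOf x : Int) + 1 < (l.idxOf q : Int) + 1) := by exact_mod_cast by omega
      simp [h1, hxq, hlt]
    · have h1 : ¬ ((l.idxOf x : Int) + 1 < (l.idxOf q : Int) + 1) := by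
        simp only [not_lt] at hlt ⊢; exact_mod_cast by omega
      simp [h1, hxq, hlt]

-- A's first loop builds posItems of the distinct colors over the initial deck a
theorem init_dict (a : List Int) :
    (PySem.List.enumerate a 0).foldl
        (fun d p => if d.contains p.2 then d else d.insert p.2 (p.1 + 1)) PySem.Dict.empty
      = PySem.Dict.mk (posItems (PySem.Set.ofList a) a) := by
  induction a using List.reverseRecOn with
  | nil => simp [posItems, PySem.List.enumerate, PySem.Set.ofList]; rfl
  | append_singleton xs x ih =>
    rw [PySem.List.enumerate_append]
    rw [List.foldl_append, ih]
    by_cases hx : x ∈ xs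
    · have hc : (PySem.Dict.mk (posItems (PySem.Set.ofList xs) xs)).contains x = true := by
        rw [PySem.Dict.contains_iff_mem_keys, keys_posItems]
        exact (PySem.Set.mem_ofList xs x).mpr hx
      have hof : PySem.Set.ofList (xs ++ [x]) = PySem.Set.ofList xs := by
        simp [PySem.Set.ofList_append, PySem.Set.update_cons, PySem.Set.update_nil,
          PySem.Set.add, PySem.Set.mem_ofList, hx]
      simp only [PySem.List.enumerate_cons, PySem.List.enumerate_nil, List.foldl_cons,
        List.foldl_nil, hc, if_true]
      rw [hof]
      apply PySem.Dict.ext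
      show posItems _ xs = posItems _ (xs ++ [x])
      apply List.map_congr_left
      intro y hy
      rw [List.idxOf_append_of_mem ((PySem.Set.mem_ofList xs y).mp hy)]
    · have hc : (PySem.Dict.mk (posItems (PySem.Set.ofList xs) xs)).contains x = false := by
        rw [← Bool.not_eq_true, PySem.Dict.contains_iff_mem_keys, keys_posItems]
        simpa [PySem.Set.mem_ofList] using hx
      have hof : PySem.Set.ofList (xs ++ [x]) = PySem.Set.ofList xs ++ [x] := by
        simp [PySem.Set.ofList_append, PySem.Set.update_cons, PySem.Set.update_nil,
          PySem.Set.add, PySem.Set.mem_ofList, hx]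
      simp only [PySem.List.enumerate_cons, PySem.List.enumerate_nil, List.foldl_cons,
        List.foldl_nil, hc]
      simp only [Bool.false_eq_true, if_false]
      apply PySem.Dict.ext
      rw [PySem.Dict.items_insert, hc]
      simp only [Bool.false_eq_true, if_false]
      show posItems _ xs ++ [(x, 0 + (xs.length : Int) + 1)] = posItems _ (xs ++ [x])
      rw [hof]
      simp only [posItems, List.map_append, List.map_cons, List.map_nil]
      congr 1
      · apply List.map_congr_left
        intro y hy
        rw [List.idxOf_append_of_mem ((PySem.Set.mem_ofList xs y).mp hy)]
      · rw [List.idxOf_append_of_notMem hx]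
        simp [List.idxOf_cons_self]

-- main loop correspondence: A's fold over the dict tracks B's fold over the deck
theorem loop_eq (K : List Int) (hK : K.Nodup) (t : List Int) :
    ∀ (l : List Int) (acc : List String), (∀ x, x ∈ l ↔ x ∈ K) → (∀ q ∈ t, q ∈ K) →
    t.foldl
      (fun st q =>
        let jpos := st.2.getD q 0
        let d' : PySem.Dict Int Int :=
          PySem.Dict.mk (st.2.items.map (fun p => if p.2 < jpos then (p.1, p.2 + 1) else p))
        (st.1 ++ [PySem.Int.toStr jpos], d'.insert q 1))
      (acc, PySem.Dict.mk (posItems K l))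
    = (fun r => (r.1, PySem.Dict.mk (posItems K r.2)))
        (t.foldl
          (fun st q =>
            match PySem.List.index? st.2 q with
            | some i => (st.1 ++ [PySem.Int.toStr ((i : Int) + 1)], q :: st.2.eraseIdx i)
            | none => st)
          (acc, l)) := by
  induction t with
  | nil => intro l acc _ _; rfl
  | cons q ts ih =>
    intro l acc hlK ht
    have hqK : q ∈ K := ht q (List.mem_cons_self)
    have hql : q ∈ l := (hlK q).mpr hqK
    simp only [List.foldl_cons]
    rw [index?_eq_some_idxOf l q hql]
    dsimp only
    rw [List.eraseIdx_idxOf_eq_erase]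
    have hstep :
        (PySem.Dict.mk ((PySem.Dict.mk (posItems K l)).items.map
            (fun p => if p.2 < (PySem.Dict.mk (posItems K l)).getD q 0 then (p.1, p.2 + 1) else p))).insert q 1
          = PySem.Dict.mk (posItems K (q :: l.erase q)) := dict_step K l hK hlK q hql
    simp only [getD_posItems K l hK q hqK] at hstep ⊢
    rw [hstep]
    exact ih (q :: l.erase q) (acc ++ [PySem.Int.toStr ((l.idxOf q : Int) + 1)])
      (fun x => ((List.perm_cons_erase hql).mem_iff (a := x)).symm.trans (hlK x))
      (fun r hr => ht r (List.mem_cons_of_mem q hr))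

-- ===== VERDICT (by name: the statement is the Claim_ definition above) =====
theorem solve_spec : Claim_equal_solve := by
  intro a t _ hpre
  unfold Spec_solve solve solve_alt
  rw [init_dict]
  have h := loop_eq (PySem.Set.ofList a) (PySem.Set.nodup_ofList a) t a []
    (fun x => (PySem.Set.mem_ofList a x).symm)
    (fun q hq => (PySem.Set.mem_ofList a q).mpr (hpre q hq))
  simp only [h]
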